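-- pv_equiv track=rewrite | github.com/FacundoSpira/proyecto-grado | main.py | get_dist_sem
-- ===== SOURCE A (Python) =====
-- S = [
--     1,
--     2,
--     3,
--     4,
--     5,
-- ]  # conjunto de semestres. Cada semestre representa una altura de la carrera que la unidad curricular puede ser sugerida
--
-- SUG = [
--     ("cDiv", 1, "computacion"),
--     ("gal1", 1, "computacion"),
--     ("cDivv", 2, "computacion"),
--     ("gal2", 2, "computacion"),
--     ("pye", 3, "computacion"),
--     ("md1", 3, "computacion"),
--     ("md2", 4, "computacion"),
--     ("p1", 4, "computacion"),
--     ("p2", 5, "computacion"),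
--     ("tProg", 5, "computacion"),
-- ]  # conjunto de triplas donde la unidad curricular c se sugiere en el semestre s para la carrera k
--
-- def get_dist_sem(c1, c2):
--     # Encuentra las carreras en las que ambos cursos están sugeridos
--     careers_in_common = [
--         k
--         for (_, _, k) in SUG
--         if any((c1, s1, k) in SUG for s1 in S) and any((c2, s2, k) in SUG for s2 in S)
--     ]
--
--     # Calcula la distancia mínima en semestres para las carreras en común
--     if careers_in_common:
--         distances = []
--         for k in careers_in_common:
--             semester_c1 = [s for c, s, kk in SUG if c == c1 and kk == k][0]
--             semester_c2 = [s for c, s, kk in SUG if c == c2 and kk == k][0]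
--
--             # Calcula la distancia mínima para la carrera k específica
--             distances.append(abs(semester_c1 - semester_c2))
--
--         # Retorna la mínima distancia encontrada entre las carreras comunes
--         return min(distances)
--     else:
--         # Devuelve |S| si no hay carreras en común entre c1 y c2
--         return len(S)
-- ===== SOURCE B (Python) =====
-- S = [
--     1,
--     2,
--     3,
--     4,
--     5,
-- ]
--
-- SUG = [
--     ("cDiv", 1, "computacion"),
--     ("gal1", 1, "computacion"),
--     ("cDivv", 2, "computacion"),
--     ("gal2", 2, "computacion"),
--     ("pye", 3, "computacion"),
--     ("md1", 3, "computacion"),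
--     ("md2", 4, "computacion"),
--     ("p1", 4, "computacion"),
--     ("p2", 5, "computacion"),
--     ("tProg", 5, "computacion"),
-- ]
--
--
-- def get_dist_sem(c1, c2):
--     # One pass over SUG builds course -> {career: first suggested semester}.
--     index = {}
--     for c, s, k in SUG:
--         index.setdefault(c, {}).setdefault(k, s)
--     m1 = index.get(c1, {})
--     m2 = index.get(c2, {})
--     common = [k for k in m1 if k in m2]
--     if not common:
--         return len(S)
--     return min(abs(m1[k] - m2[k]) for k in common)
-- ===== Notes on version B (the rewrite author's own statement) =====
-- stated objective: simpler
-- what changed: B builds a course -> {career: first semester} index in one pass over SUG and then intersects the two courses' career maps, instead of A's nested re-scans of SUG (an any-over-S membership test per row plus a fresh filter pass per common career).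
import Mathlib
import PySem

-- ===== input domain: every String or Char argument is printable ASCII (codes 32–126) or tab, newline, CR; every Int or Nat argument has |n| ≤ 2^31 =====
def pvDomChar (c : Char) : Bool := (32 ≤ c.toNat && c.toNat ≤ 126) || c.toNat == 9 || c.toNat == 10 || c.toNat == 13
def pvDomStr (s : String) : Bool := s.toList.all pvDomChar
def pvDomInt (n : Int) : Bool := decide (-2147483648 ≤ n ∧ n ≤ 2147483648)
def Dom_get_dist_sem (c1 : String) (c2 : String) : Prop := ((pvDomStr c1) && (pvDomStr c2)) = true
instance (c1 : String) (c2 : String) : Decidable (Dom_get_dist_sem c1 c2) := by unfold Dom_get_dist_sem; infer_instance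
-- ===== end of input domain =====

-- B replaces A's nested re-scans of SUG with a single index-building pass (course -> career -> first semester); objective: simpler.

def pvS : List Int := [1, 2, 3, 4, 5]

def pvSUG : List (String × Int × String) :=
  [("cDiv", 1, "computacion"),
   ("gal1", 1, "computacion"),
   ("cDivv", 2, "computacion"),
   ("gal2", 2, "computacion"),
   ("pye", 3, "computacion"),
   ("md1", 3, "computacion"),
   ("md2", 4, "computacion"),
   ("p1", 4, "computacion"),
   ("p2", 5, "computacion"),
   ("tProg", 5, "computacion")]

-- ===== PORT A =====
def get_dist_sem (c1 : String) (c2 : String) : Int :=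
  let careers_in_common : List String :=
    (pvSUG.filter (fun t =>
        (pvS.any fun s1 => pvSUG.contains (c1, s1, t.2.2)) &&
        (pvS.any fun s2 => pvSUG.contains (c2, s2, t.2.2)))).map (fun t => t.2.2)
  if careers_in_common ≠ [] then
    let distances : List Int := careers_in_common.map (fun k =>
      -- Python's [...][0]: the list is provably nonempty whenever this branch runs, so getD is never hit on []
      let semester_c1 := PySem.List.pyGetD ((pvSUG.filter (fun t => t.1 == c1 && t.2.2 == k)).map (fun t => t.2.1)) 0 0
      let semester_c2 := PySem.List.pyGetD ((pvSUG.filter (fun t => t.1 == c2 && t.2.2 == k)).map (fun t => t.2.1)) 0 0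
      |semester_c1 - semester_c2|)
    -- min(distances): distances is nonempty here, so the default is never hit
    (PySem.List.min? distances (fun x => x)).getD 0
  else
    PySem.List.len pvS

-- ===== PORT B =====
def get_dist_sem_alt (c1 : String) (c2 : String) : Int :=
  let index : PySem.Dict String (PySem.Dict String Int) :=
    pvSUG.foldl (fun d t =>
      d.insert t.1 ((d.getD t.1 PySem.Dict.empty).setdefault t.2.2 t.2.1)) PySem.Dict.empty
  let m1 := index.getD c1 PySem.Dict.empty
  let m2 := index.getD c2 PySem.Dict.empty
  let common := m1.keys.filter (fun k => m2.contains k)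
  if common = [] then PySem.List.len pvS
  else (PySem.List.min? (common.map (fun k => |m1.getD k 0 - m2.getD k 0|)) (fun x => x)).getD 0

-- ===== PRECONDITION & SPEC =====
def Spec_get_dist_sem (c1 : String) (c2 : String) (out : Int) : Prop := out = get_dist_sem_alt c1 c2
instance (c1 : String) (c2 : String) (out : Int) : Decidable (Spec_get_dist_sem c1 c2 out) := by unfold Spec_get_dist_sem; infer_instance

-- ===== CLAIM (what is proved, stated in full; the proofs are below) =====
def Claim_equal_get_dist_sem : Prop := ∀ (c1 : String) (c2 : String), Dom_get_dist_sem c1 c2 → Spec_get_dist_sem c1 c2 (get_dist_sem c1 c2)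

-- ===== LEMMAS AND PROOFS =====

-- the course names occurring in pvSUG
def pvNames : List String :=
  ["cDiv", "gal1", "cDivv", "gal2", "pye", "md1", "md2", "p1", "p2", "tProg"]

lemma eq_of_left_not_mem (c1 c2 : String) (h : c1 ∉ pvNames) :
    get_dist_sem c1 c2 = get_dist_sem_alt c1 c2 := by
  simp only [pvNames, List.mem_cons, List.not_mem_nil, or_false, not_or] at h
  obtain ⟨h1, h2, h3, h4, h5, h6, h7, h8, h9, h10⟩ := h
  simp [get_dist_sem, get_dist_sem_alt, pvSUG, pvS, h1, h2, h3, h4, h5, h6, h7, h8, h9, h10,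
    beq_iff_eq, Ne.symm h1, Ne.symm h2, Ne.symm h3, Ne.symm h4, Ne.symm h5,
    Ne.symm h6, Ne.symm h7, Ne.symm h8, Ne.symm h9, Ne.symm h10,
    PySem.Dict.getD, PySem.Dict.get?, PySem.Dict.insert, PySem.Dict.setdefault,
    PySem.Dict.contains, PySem.Dict.empty, PySem.Dict.keys, PySem.List.len]

lemma eq_of_right_not_mem (c1 c2 : String) (h : c2 ∉ pvNames) :
    get_dist_sem c1 c2 = get_dist_sem_alt c1 c2 := by
  simp only [pvNames, List.mem_cons, List.not_mem_nil, or_false, not_or] at h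
  obtain ⟨h1, h2, h3, h4, h5, h6, h7, h8, h9, h10⟩ := h
  simp [get_dist_sem, get_dist_sem_alt, pvSUG, pvS, h1, h2, h3, h4, h5, h6, h7, h8, h9, h10,
    beq_iff_eq, Ne.symm h1, Ne.symm h2, Ne.symm h3, Ne.symm h4, Ne.symm h5,
    Ne.symm h6, Ne.symm h7, Ne.symm h8, Ne.symm h9, Ne.symm h10,
    PySem.Dict.getD, PySem.Dict.get?, PySem.Dict.insert, PySem.Dict.setdefault,
    PySem.Dict.contains, PySem.Dict.empty, PySem.Dict.keys, PySem.List.len]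

-- ===== VERDICT (by name: the statement is the Claim_ definition above) =====
theorem get_dist_sem_spec : Claim_equal_get_dist_sem := by
  intro c1 c2 _
  unfold Spec_get_dist_sem
  by_cases h1 : c1 ∈ pvNames
  · by_cases h2 : c2 ∈ pvNames
    · simp only [pvNames, List.mem_cons, List.not_mem_nil, or_false] at h1 h2
      rcases h1 with rfl | rfl | rfl | rfl | rfl | rfl | rfl | rfl | rfl | rfl <;>
        rcases h2 with rfl | rfl | rfl | rfl | rfl | rfl | rfl | rfl | rfl | rfl <;>
        decide
    · exact eq_of_right_not_mem c1 c2 h2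
  · exact eq_of_left_not_mem c1 c2 h1
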